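-- pv_equiv track=rewrite | github.com/ragnaroik/TIL | baekjoon/bronze3/11034.py | cnt_jump
-- ===== SOURCE A (Python) =====
-- def cnt_jump(A, B, C):
--     cnt = 0
--     while A+1 != B or B+1 != C:
--         if B-A >= C-B:
--             C = B-1
--             B, C = C, B
--             cnt += 1
--         else:
--             A = B+1
--             A, B = B, A
--             cnt += 1
--     return cnt
-- ===== SOURCE B (Python) =====
-- def cnt_jump(A, B, C):
--     # closed form: the simulation always shrinks the larger gap by one per
--     # step until both gaps are 1, taking max(B-A, C-B) - 1 steps in total.
--     return max(B - A, C - B) - 1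
-- ===== Notes on version B (the rewrite author's own statement) =====
-- stated objective: faster
-- what changed: Replaced the step-by-step jump simulation loop with the closed form max(B-A, C-B) - 1.
import Mathlib
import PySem

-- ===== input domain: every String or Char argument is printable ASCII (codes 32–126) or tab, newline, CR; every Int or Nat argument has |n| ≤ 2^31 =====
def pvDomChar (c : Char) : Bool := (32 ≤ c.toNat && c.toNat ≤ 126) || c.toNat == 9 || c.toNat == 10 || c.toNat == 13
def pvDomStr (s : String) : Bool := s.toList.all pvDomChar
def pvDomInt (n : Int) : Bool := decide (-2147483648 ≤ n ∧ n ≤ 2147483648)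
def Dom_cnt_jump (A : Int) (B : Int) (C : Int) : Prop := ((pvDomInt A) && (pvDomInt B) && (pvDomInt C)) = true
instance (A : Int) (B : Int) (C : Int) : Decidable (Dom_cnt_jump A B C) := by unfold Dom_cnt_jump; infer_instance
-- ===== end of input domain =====

-- B replaces A's step-by-step jump simulation with the closed form
-- max(B-A, C-B) - 1 (objective: faster, O(1) instead of O(max gap)).


-- ===== PORT A =====
-- Fuel-indexed transcription of A's while loop; on every input admitted by
-- Pre_cnt_jump the fuel is sufficient, so the fallback branch is never taken
-- (fuel is only a totality guard: the Python loop diverges outside Pre_).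
def cntLoop : Nat → Int → Int → Int → Int → Int
  | 0, _, _, _, cnt => cnt
  | Nat.succ f, A, B, C, cnt =>
    if A + 1 ≠ B ∨ B + 1 ≠ C then
      if B - A ≥ C - B then
        -- C = B-1; B, C = C, B
        cntLoop f A (B - 1) B (cnt + 1)
      else
        -- A = B+1; A, B = B, A
        cntLoop f B (B + 1) C (cnt + 1)
    else cnt

def cnt_jump (A : Int) (B : Int) (C : Int) : Int :=
  cntLoop ((max (B - A) (C - B)).toNat + 1) A B C 0

-- ===== PORT B =====
def cnt_jump_alt (A : Int) (B : Int) (C : Int) : Int :=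
  max (B - A) (C - B) - 1

-- ===== PRECONDITION & SPEC =====
-- Pre_ admits exactly the inputs on which A's while loop terminates
-- (already-consecutive triples, or a larger gap of at least 2 on the side the
-- first step shrinks); on every other input the Python loop runs forever.
def Pre_cnt_jump (A : Int) (B : Int) (C : Int) : Prop :=
  (A + 1 = B ∧ B + 1 = C) ∨ (C - B ≤ B - A ∧ 2 ≤ B - A) ∨ (B - A < C - B ∧ 2 ≤ C - B)
instance (A : Int) (B : Int) (C : Int) : Decidable (Pre_cnt_jump A B C) := by
  unfold Pre_cnt_jump; infer_instance

def pvWitness_cnt_jump : Int × Int × Int := (1, 4, 6)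

def Spec_cnt_jump (A : Int) (B : Int) (C : Int) (out : Int) : Prop := out = cnt_jump_alt A B C
instance (A : Int) (B : Int) (C : Int) (out : Int) : Decidable (Spec_cnt_jump A B C out) := by unfold Spec_cnt_jump; infer_instance

-- ===== CLAIM (what is proved, stated in full; the proofs are below) =====
def Claim_equal_cnt_jump : Prop := ∀ (A : Int) (B : Int) (C : Int), Dom_cnt_jump A B C → Pre_cnt_jump A B C → Spec_cnt_jump A B C (cnt_jump A B C)

-- ===== LEMMAS AND PROOFS =====

-- Loop invariant: with enough fuel, the loop returns cnt + (max gap) - 1.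
theorem cntLoop_closed (f : Nat) :
    ∀ (A B C cnt : Int), Pre_cnt_jump A B C →
      (max (B - A) (C - B)).toNat ≤ f →
      cntLoop f A B C cnt = cnt + max (B - A) (C - B) - 1 := by
  induction f with
  | zero =>
    intro A B C cnt h hf
    exfalso
    unfold Pre_cnt_jump at h
    omega
  | succ f ih =>
    intro A B C cnt h hf
    unfold Pre_cnt_jump at h
    by_cases hd : A + 1 = B ∧ B + 1 = C
    · simp only [cntLoop, hd.1, hd.2]
      simp
      omega
    · have hcond : A + 1 ≠ B ∨ B + 1 ≠ C := by tauto
      simp only [cntLoop, if_pos hcond]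
      by_cases hbr : B - A ≥ C - B
      · rw [if_pos hbr]
        rw [ih A (B - 1) B (cnt + 1) (by unfold Pre_cnt_jump; omega) (by omega)]
        omega
      · rw [if_neg hbr]
        rw [ih B (B + 1) C (cnt + 1) (by unfold Pre_cnt_jump; omega) (by omega)]
        omega

-- ===== VERDICT (by name: the statement is the Claim_ definition above) =====
theorem cnt_jump_spec : Claim_equal_cnt_jump := by
  intro A B C _ hpre
  unfold Spec_cnt_jump cnt_jump cnt_jump_alt
  rw [cntLoop_closed _ A B C 0 hpre (by omega)]
  omega
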